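-- pv_equiv track=rewrite | github.com/dracohu2025-cloud/draco-skills-collection | feishu-doc-to-wechat-draft/scripts/wechat_draft_publisher/renderer.py | _remap_pygments_colors_to_github_like
-- ===== SOURCE A (Python) =====
-- def _remap_pygments_colors_to_github_like(html: str) -> str:
--     replacements = {
--         '#008000': '#22863A',  # keywords / shell builtins
--         '#00F': '#6F42C1',
--         '#0000FF': '#6F42C1',
--         '#19177C': '#005CC5',
--         '#666': '#24292E',
--         '#666666': '#24292E',
--         '#BA2121': '#032F62',
--         '#AA5D1F': '#032F62',
--         '#3D7B7B': '#6A737D',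
--         '#BBB': '#24292E',
--         '#bbbbbb': '#24292E',
--     }
--     for old, new in replacements.items():
--         html = html.replace(old, new)
--     return html
-- ===== SOURCE B (Python) =====
-- import re
--
-- _COLOR_MAP = {
--     '#008000': '#22863A',  # keywords / shell builtins
--     '#00F': '#6F42C1',
--     '#0000FF': '#6F42C1',
--     '#19177C': '#005CC5',
--     '#666': '#24292E',
--     '#666666': '#24292E',
--     '#BA2121': '#032F62',
--     '#AA5D1F': '#032F62',
--     '#3D7B7B': '#6A737D',
--     '#BBB': '#24292E',
--     '#bbbbbb': '#24292E',
-- }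
--
-- # One ordered alternation: a single left-to-right pass instead of 11 full-string scans.
-- _COLOR_RE = re.compile('|'.join(re.escape(k) for k in _COLOR_MAP))
--
--
-- def _remap_pygments_colors_to_github_like(html: str) -> str:
--     return _COLOR_RE.sub(lambda m: _COLOR_MAP[m.group(0)], html)
-- ===== Notes on version B (the rewrite author's own statement) =====
-- stated objective: idiomatic
-- what changed: The 11 sequential full-string str.replace passes are replaced by one precompiled regex alternation ('|'.join of the escaped keys in dict order) applied in a single left-to-right pass with re.sub dispatching each match through the mapping.
import Mathlib
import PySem

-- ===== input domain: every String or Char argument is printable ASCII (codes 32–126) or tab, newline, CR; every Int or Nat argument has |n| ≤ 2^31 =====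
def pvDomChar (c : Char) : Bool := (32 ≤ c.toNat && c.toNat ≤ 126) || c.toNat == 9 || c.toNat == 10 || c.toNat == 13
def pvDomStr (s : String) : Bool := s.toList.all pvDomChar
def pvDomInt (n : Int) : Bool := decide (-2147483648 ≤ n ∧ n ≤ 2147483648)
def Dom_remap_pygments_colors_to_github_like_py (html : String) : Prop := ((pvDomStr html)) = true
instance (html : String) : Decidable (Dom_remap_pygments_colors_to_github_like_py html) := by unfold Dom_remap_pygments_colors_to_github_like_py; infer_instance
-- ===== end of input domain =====

-- B builds one ordered regex alternation over the same mapping and rewrites in a single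
-- left-to-right pass (idiomatic re.sub) instead of A's 11 sequential full-string replaces.


-- ===== PORT A =====
def remap_pygments_colors_to_github_like_py (html : String) : String :=
  let h1 := PySem.Str.replace html "#008000" "#22863A"
  let h2 := PySem.Str.replace h1 "#00F" "#6F42C1"
  let h3 := PySem.Str.replace h2 "#0000FF" "#6F42C1"
  let h4 := PySem.Str.replace h3 "#19177C" "#005CC5"
  let h5 := PySem.Str.replace h4 "#666" "#24292E"
  let h6 := PySem.Str.replace h5 "#666666" "#24292E"
  let h7 := PySem.Str.replace h6 "#BA2121" "#032F62"
  let h8 := PySem.Str.replace h7 "#AA5D1F" "#032F62"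
  let h9 := PySem.Str.replace h8 "#3D7B7B" "#6A737D"
  let h10 := PySem.Str.replace h9 "#BBB" "#24292E"
  let h11 := PySem.Str.replace h10 "#bbbbbb" "#24292E"
  h11

-- ===== PORT B =====
-- the ordered mapping (dict in insertion order)
def pvColorMap : List (String × String) :=
  [("#008000", "#22863A"), ("#00F", "#6F42C1"), ("#0000FF", "#6F42C1"),
   ("#19177C", "#005CC5"), ("#666", "#24292E"), ("#666666", "#24292E"),
   ("#BA2121", "#032F62"), ("#AA5D1F", "#032F62"), ("#3D7B7B", "#6A737D"),
   ("#BBB", "#24292E"), ("#bbbbbb", "#24292E")]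

-- the compiled alternation: the escaped literal keys, in dict order, with their mapped values
def pvTableB : List (List Char × List Char) := pvColorMap.map (fun kv => (kv.1.toList, kv.2.toList))

-- first alternative (in pattern order) matching at the current position, with its mapped value
def pvFindMatch (tbl : List (List Char × List Char)) (l : List Char) : Option (List Char × List Char) :=
  tbl.find? (fun kv => kv.1.isPrefixOf l)

-- hand port of `_COLOR_RE.sub(lambda m: _COLOR_MAP[m.group(0)], html)`: re.sub scans left to
-- right, at each position tries the alternatives in pattern order, on a match emits the mapped
-- value and resumes after the matched text; exact for this pattern of literal alternatives.
-- Fuel = remaining length (re.sub consumes at least one char per step; every key is nonempty).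
def pvSubGo (tbl : List (List Char × List Char)) : Nat → List Char → List Char
  | 0, l => l
  | _ + 1, [] => []
  | f + 1, c :: t =>
    match pvFindMatch tbl (c :: t) with
    | some kv => kv.2 ++ pvSubGo tbl f (List.drop kv.1.length (c :: t))
    | none => c :: pvSubGo tbl f t

def remap_pygments_colors_to_github_like_py_alt (html : String) : String :=
  String.ofList (pvSubGo pvTableB html.toList.length html.toList)

-- ===== PRECONDITION & SPEC =====
def Spec_remap_pygments_colors_to_github_like_py (html : String) (out : String) : Prop := out = remap_pygments_colors_to_github_like_py_alt html
instance (html : String) (out : String) : Decidable (Spec_remap_pygments_colors_to_github_like_py html out) := by unfold Spec_remap_pygments_colors_to_github_like_py; infer_instance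

-- ===== CLAIM (what is proved, stated in full; the proofs are below) =====
def Claim_equal_remap_pygments_colors_to_github_like_py : Prop := ∀ (html : String), Dom_remap_pygments_colors_to_github_like_py html → Spec_remap_pygments_colors_to_github_like_py html (remap_pygments_colors_to_github_like_py html)

-- ===== LEMMAS AND PROOFS =====

-- A clean recursion equal to PySem.Chars.replace's fueled accumulator loop.
def pvRgo (old new : List Char) : Nat → List Char → List Char
  | 0, l => l
  | _ + 1, [] => []
  | f + 1, c :: t =>
    if old.isPrefixOf (c :: t) then new ++ pvRgo old new f (List.drop old.length (c :: t))
    else c :: pvRgo old new f t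

def pvRS (old new l : List Char) : List Char := pvRgo old new l.length l

def pvSS (tbl : List (List Char × List Char)) (l : List Char) : List Char := pvSubGo tbl l.length l

def pvChain (tbl : List (List Char × List Char)) (l : List Char) : List Char :=
  tbl.foldl (fun s kv => pvRS kv.1 kv.2 s) l

-- chunk glue: a '#' before each chunk
def pvFlat (ps : List (List Char)) : List Char := ps.flatMap (fun q => '#' :: q)

-- action of one replace pass on one chunk body
def pvFApp (w u p : List Char) : List Char := if w.isPrefixOf p then u ++ p.drop w.length else p

def pvFc (tbl : List (List Char × List Char)) (p : List Char) : List Char :=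
  tbl.foldl (fun q kv => pvFApp kv.1.tail kv.2.tail q) p

def pvGc (tbl : List (List Char × List Char)) (p : List Char) : List Char :=
  match pvFindMatch tbl ('#' :: p) with
  | some kv => kv.2.tail ++ p.drop kv.1.tail.length
  | none => p

-- well-formedness of the table: every key/value starts with '#' and has no other '#'
def pvWf1 (tbl : List (List Char × List Char)) : Prop :=
  ∀ kv ∈ tbl, kv.1.head? = some '#' ∧ kv.2.head? = some '#' ∧ '#' ∉ kv.1.tail ∧ '#' ∉ kv.2.tail

-- no key tail is a prefix of (or longer than) any value tail
def pvWf2 (tbl : List (List Char × List Char)) : Prop :=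
  ∀ kv ∈ tbl, ∀ kv' ∈ tbl, kv.1.tail.length ≤ kv'.2.tail.length ∧ ¬ (kv.1.tail <+: kv'.2.tail)

theorem pvWf1_tableB : pvWf1 pvTableB := by
  intro kv hm
  fin_cases hm <;> refine ⟨rfl, rfl, by decide, by decide⟩
theorem pvWf2_tableB : pvWf2 pvTableB := by
  intro kv hm kv' hm'
  fin_cases hm <;> fin_cases hm' <;> exact ⟨by decide, by decide⟩

theorem pv_go_eq (old new : List Char) :
    ∀ (f : Nat) (l acc : List Char),
      PySem.Chars.replace.go old new f l acc = acc.reverse ++ pvRgo old new f l := by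
  intro f
  induction f with
  | zero => intro l acc; simp [PySem.Chars.replace.go, pvRgo]
  | succ f ih =>
    intro l acc
    cases l with
    | nil => simp [PySem.Chars.replace.go, pvRgo]
    | cons c t =>
      simp only [PySem.Chars.replace.go, pvRgo]
      split
      · rw [ih]; simp
      · rw [ih]; simp

theorem pv_replace_eq (old new s : List Char) (h : old ≠ []) :
    PySem.Chars.replace s old new = pvRS old new s := by
  unfold PySem.Chars.replace
  rw [if_neg (by simpa using h)]
  rw [pv_go_eq]; rfl

theorem pvRgo_fuel (old new : List Char) (h : old ≠ []) :
    ∀ (f f' : Nat) (l : List Char), l.length ≤ f → l.length ≤ f' →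
      pvRgo old new f l = pvRgo old new f' l := by
  intro f
  induction f with
  | zero =>
    intro f' l h1 _
    have : l = [] := List.length_eq_zero_iff.mp (Nat.le_zero.mp h1)
    subst this; cases f' <;> simp [pvRgo]
  | succ f ih =>
    intro f' l h1 h2
    cases l with
    | nil => cases f' <;> simp [pvRgo]
    | cons c t =>
      cases f' with
      | zero => simp at h2
      | succ f'' =>
        simp only [pvRgo]
        have hop : 1 ≤ old.length := List.length_pos_iff.mpr h
        split
        · congr 1
          apply ih
          · simp at h1 ⊢; omega
          · simp at h2 ⊢; omega
        · congr 1
          apply ih <;> simp at h1 h2 ⊢ <;> omega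

theorem pvRS_cons (old new : List Char) (h : old ≠ []) (c : Char) (t : List Char) :
    pvRS old new (c :: t) =
      if old.isPrefixOf (c :: t) then new ++ pvRS old new (List.drop old.length (c :: t))
      else c :: pvRS old new t := by
  show pvRgo old new (t.length + 1) (c :: t) = _
  simp only [pvRgo]
  have hop : 1 ≤ old.length := List.length_pos_iff.mpr h
  split
  · congr 1
    apply pvRgo_fuel old new h <;> simp <;> omega
  · rfl

theorem pvRS_copy (old new : List Char) (hk : old.head? = some '#') :
    ∀ (p x : List Char), '#' ∉ p → pvRS old new (p ++ x) = p ++ pvRS old new x := by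
  intro p
  induction p with
  | nil => intro x _; rfl
  | cons c p' ih =>
    intro x hp
    have hne : old ≠ [] := by intro h; subst h; simp at hk
    have hold : old = '#' :: old.tail := (List.cons_head?_tail hk).symm
    have hc : c ≠ '#' := by intro h; exact hp (by simp [h])
    rw [List.cons_append, pvRS_cons old new hne]
    rw [if_neg]
    · rw [ih x (fun h => hp (List.mem_cons_of_mem _ h))]; rfl
    · rw [hold]
      simp [List.isPrefixOf]
      intro h; exact absurd h.symm hc

theorem pv_prefix_flat (w : List Char) (hw : '#' ∉ w) :
    ∀ (p x : List Char), '#' ∉ p → (x = [] ∨ x.head? = some '#') →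
      (w <+: p ++ x ↔ w <+: p) := by
  induction w with
  | nil => intro p x _ _; simp
  | cons a w' ih =>
    intro p x hp hx
    have ha : a ≠ '#' := fun h => hw (by simp [h])
    have hw' : '#' ∉ w' := fun h => hw (List.mem_cons_of_mem _ h)
    cases p with
    | nil =>
      simp only [List.nil_append]
      constructor
      · intro h
        rcases hx with rfl | hx
        · exact absurd h (by simp)
        · exfalso
          cases x with
          | nil => simp at hx
          | cons b y =>
            simp at hx
            rcases List.cons_prefix_cons.mp h with ⟨rfl, _⟩
            exact ha (hx.symm ▸ rfl)
      · intro h; exact absurd h (by simp)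
    | cons b p' =>
      have hp' : '#' ∉ p' := fun h => hp (List.mem_cons_of_mem _ h)
      simp only [List.cons_append, List.cons_prefix_cons]
      rw [ih hw' p' x hp' hx]

theorem pvSgo_fuel (tbl : List (List Char × List Char)) (hne : ∀ kv ∈ tbl, kv.1 ≠ ([] : List Char)) :
    ∀ (f f' : Nat) (l : List Char), l.length ≤ f → l.length ≤ f' →
      pvSubGo tbl f l = pvSubGo tbl f' l := by
  intro f
  induction f with
  | zero =>
    intro f' l h1 _
    have : l = [] := List.length_eq_zero_iff.mp (Nat.le_zero.mp h1)
    subst this; cases f' <;> simp [pvSubGo]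
  | succ f ih =>
    intro f' l h1 h2
    cases l with
    | nil => cases f' <;> simp [pvSubGo]
    | cons c t =>
      cases f' with
      | zero => simp at h2
      | succ f'' =>
        simp only [pvSubGo]
        cases hfm : pvFindMatch tbl (c :: t) with
        | none =>
          simp only []
          congr 1
          apply ih <;> simp at h1 h2 ⊢ <;> omega
        | some kv =>
          have hmem : kv ∈ tbl := List.mem_of_find?_eq_some hfm
          have hk : 1 ≤ kv.1.length := List.length_pos_iff.mpr (hne kv hmem)
          simp only []
          congr 1
          apply ih
          · simp at h1 ⊢; omega
          · simp at h2 ⊢; omega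

theorem pvSS_cons (tbl : List (List Char × List Char)) (hne : ∀ kv ∈ tbl, kv.1 ≠ ([] : List Char))
    (c : Char) (t : List Char) :
    pvSS tbl (c :: t) =
      match pvFindMatch tbl (c :: t) with
      | some kv => kv.2 ++ pvSS tbl (List.drop kv.1.length (c :: t))
      | none => c :: pvSS tbl t := by
  show pvSubGo tbl (t.length + 1) (c :: t) = _
  simp only [pvSubGo]
  cases hfm : pvFindMatch tbl (c :: t) with
  | none => rfl
  | some kv =>
    have hmem : kv ∈ tbl := List.mem_of_find?_eq_some hfm
    have hk : 1 ≤ kv.1.length := List.length_pos_iff.mpr (hne kv hmem)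
    simp only []
    congr 1
    apply pvSgo_fuel tbl hne <;> simp <;> omega

theorem pvWf1_ne (tbl : List (List Char × List Char)) (h : pvWf1 tbl) :
    ∀ kv ∈ tbl, kv.1 ≠ ([] : List Char) := by
  intro kv hm hnil
  have := (h kv hm).1
  rw [hnil] at this; simp at this

theorem pvFindMatch_none (tbl : List (List Char × List Char)) (h : pvWf1 tbl)
    (c : Char) (hc : c ≠ '#') (t : List Char) : pvFindMatch tbl (c :: t) = none := by
  apply List.find?_eq_none.mpr
  intro kv hm hpre
  have hh := (h kv hm).1
  have hold : kv.1 = '#' :: kv.1.tail := (List.cons_head?_tail hh).symm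
  rw [hold] at hpre
  simp [List.isPrefixOf] at hpre
  exact hc hpre.1.symm

theorem pvSS_copy (tbl : List (List Char × List Char)) (h : pvWf1 tbl) :
    ∀ (p x : List Char), '#' ∉ p → pvSS tbl (p ++ x) = p ++ pvSS tbl x := by
  intro p
  induction p with
  | nil => intro x _; rfl
  | cons c p' ih =>
    intro x hp
    have hc : c ≠ '#' := fun hh => hp (by simp [hh])
    rw [List.cons_append, pvSS_cons tbl (pvWf1_ne tbl h)]
    rw [pvFindMatch_none tbl h c hc]
    simp only []
    rw [ih x (fun hh => hp (List.mem_cons_of_mem _ hh))]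
    rfl

theorem pv_find?_congr {α : Type} (p q : α → Bool) :
    ∀ (l : List α), (∀ x ∈ l, p x = q x) → l.find? p = l.find? q := by
  intro l
  induction l with
  | nil => intro _; rfl
  | cons a l' ih =>
    intro h
    rw [List.find?_cons, List.find?_cons, h a (by simp)]
    cases q a
    · exact ih (fun x hx => h x (List.mem_cons_of_mem _ hx))
    · rfl

theorem pvSS_flat (tbl : List (List Char × List Char)) (h : pvWf1 tbl) :
    ∀ (ps : List (List Char)), (∀ q ∈ ps, '#' ∉ q) →
      pvSS tbl (pvFlat ps) = pvFlat (ps.map (pvGc tbl)) := by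
  intro ps
  induction ps with
  | nil => intro _; rfl
  | cons p ps' ih =>
    intro hps
    have hp : '#' ∉ p := hps p (by simp)
    have hps' : ∀ q ∈ ps', '#' ∉ q := fun q hq => hps q (List.mem_cons_of_mem _ hq)
    have hshape : pvFlat ps' = [] ∨ (pvFlat ps').head? = some '#' := by
      cases ps' with
      | nil => exact Or.inl rfl
      | cons q qs => exact Or.inr (by simp [pvFlat])
    have hne := pvWf1_ne tbl h
    have hflat : pvFlat (p :: ps') = '#' :: (p ++ pvFlat ps') := by simp [pvFlat]
    rw [hflat, pvSS_cons tbl hne]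
    have hcongr : pvFindMatch tbl ('#' :: (p ++ pvFlat ps')) = pvFindMatch tbl ('#' :: p) := by
      apply pv_find?_congr
      intro kv hm
      obtain ⟨hk, _, hknoH, _⟩ := h kv hm
      have hkc : kv.1 = '#' :: kv.1.tail := (List.cons_head?_tail hk).symm
      have hiff := pv_prefix_flat kv.1.tail hknoH p _ hp hshape
      by_cases hb : kv.1.tail <+: p
      · have h1 : kv.1.tail.isPrefixOf (p ++ pvFlat ps') = true :=
          List.isPrefixOf_iff_prefix.mpr (hiff.mpr hb)
        have h2 : kv.1.tail.isPrefixOf p = true := List.isPrefixOf_iff_prefix.mpr hb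
        rw [hkc]
        simp [List.isPrefixOf, h1, h2]
      · have h1 : kv.1.tail.isPrefixOf (p ++ pvFlat ps') = false :=
          eq_false_of_ne_true (fun hc => hb (hiff.mp (List.isPrefixOf_iff_prefix.mp hc)))
        have h2 : kv.1.tail.isPrefixOf p = false :=
          eq_false_of_ne_true (fun hc => hb (List.isPrefixOf_iff_prefix.mp hc))
        rw [hkc]
        simp [List.isPrefixOf, h1, h2]
    rw [hcongr]
    cases hfm : pvFindMatch tbl ('#' :: p) with
    | none =>
      simp only []
      rw [pvSS_copy tbl h _ _ hp, ih hps']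
      have hgc : pvGc tbl p = p := by unfold pvGc; rw [hfm]
      simp [pvFlat, hgc]
    | some kv =>
      have hmem := List.mem_of_find?_eq_some hfm
      have hpred := List.find?_some hfm
      obtain ⟨hk, hv, hknoH, hvnoH⟩ := h kv hmem
      have hkc : kv.1 = '#' :: kv.1.tail := (List.cons_head?_tail hk).symm
      have hvc : kv.2 = '#' :: kv.2.tail := (List.cons_head?_tail hv).symm
      have hwp : kv.1.tail <+: p := by
        rw [hkc] at hpred
        exact (List.cons_prefix_cons.mp (List.isPrefixOf_iff_prefix.mp hpred)).2
      have hklen : kv.1.length = kv.1.tail.length + 1 := by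
        conv_lhs => rw [hkc]
        simp
      have hdrop : List.drop kv.1.length ('#' :: (p ++ pvFlat ps')) =
          List.drop kv.1.tail.length p ++ pvFlat ps' := by
        rw [hklen, List.drop_succ_cons, List.drop_append_of_le_length hwp.length_le]
      simp only []
      rw [hdrop, pvSS_copy tbl h _ _ (fun hm => hp (List.mem_of_mem_drop hm)), ih hps']
      have hgc : pvGc tbl p = kv.2.tail ++ List.drop kv.1.tail.length p := by
        unfold pvGc; rw [hfm]
      simp [pvFlat, hgc, List.append_assoc]
      conv_lhs => rw [hvc]
      simp

theorem pvRS_flat (k v : List Char) (hk : k.head? = some '#') (hknoH : '#' ∉ k.tail)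
    (hv : v.head? = some '#') (hvnoH : '#' ∉ v.tail) :
    ∀ (ps : List (List Char)), (∀ q ∈ ps, '#' ∉ q) →
      pvRS k v (pvFlat ps) = pvFlat (ps.map (pvFApp k.tail v.tail)) := by
  have hkne : k ≠ [] := by intro h; rw [h] at hk; simp at hk
  have hkc : k = '#' :: k.tail := (List.cons_head?_tail hk).symm
  have hvc : v = '#' :: v.tail := (List.cons_head?_tail hv).symm
  intro ps
  induction ps with
  | nil => intro _; rfl
  | cons p ps' ih =>
    intro hps
    have hp : '#' ∉ p := hps p (by simp)
    have hps' : ∀ q ∈ ps', '#' ∉ q := fun q hq => hps q (List.mem_cons_of_mem _ hq)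
    have hshape : pvFlat ps' = [] ∨ (pvFlat ps').head? = some '#' := by
      cases ps' with
      | nil => exact Or.inl rfl
      | cons q qs => exact Or.inr (by simp [pvFlat])
    have hflat : pvFlat (p :: ps') = '#' :: (p ++ pvFlat ps') := by simp [pvFlat]
    rw [hflat, pvRS_cons k v hkne]
    by_cases hw : k.tail <+: p
    · have hpre : k.isPrefixOf ('#' :: (p ++ pvFlat ps')) = true := by
        rw [List.isPrefixOf_iff_prefix]
        conv_lhs => rw [hkc]
        exact List.cons_prefix_cons.mpr
          ⟨rfl, (pv_prefix_flat k.tail hknoH p _ hp hshape).mpr hw⟩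
      rw [if_pos hpre]
      have hlen : k.tail.length ≤ p.length := hw.length_le
      have hklen : k.length = k.tail.length + 1 := by
        conv_lhs => rw [hkc]
        simp
      have hdrop : List.drop k.length ('#' :: (p ++ pvFlat ps')) =
          List.drop k.tail.length p ++ pvFlat ps' := by
        rw [hklen, List.drop_succ_cons, List.drop_append_of_le_length hlen]
      rw [hdrop,
        pvRS_copy k v hk _ _ (fun hm => hp (List.mem_of_mem_drop hm)),
        ih hps']
      have happ : pvFApp k.tail v.tail p = v.tail ++ List.drop k.tail.length p := by
        unfold pvFApp
        rw [if_pos (List.isPrefixOf_iff_prefix.mpr hw)]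
      simp [pvFlat, happ, List.append_assoc]
      conv_lhs => rw [hvc]
      simp
    · have hpre : ¬ (k.isPrefixOf ('#' :: (p ++ pvFlat ps')) = true) := by
        rw [List.isPrefixOf_iff_prefix]
        intro hcon
        rw [hkc] at hcon
        exact hw ((pv_prefix_flat k.tail hknoH p _ hp hshape).mp
          (List.cons_prefix_cons.mp hcon).2)
      rw [if_neg hpre,
        pvRS_copy k v hk _ _ hp, ih hps']
      have happ : pvFApp k.tail v.tail p = p := by
        unfold pvFApp
        rw [if_neg]
        intro hcon
        exact hw (List.isPrefixOf_iff_prefix.mp hcon)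
      simp [pvFlat, happ]

theorem pvChain_flat (tbl : List (List Char × List Char)) (h : pvWf1 tbl) :
    ∀ (p0 : List Char) (ps : List (List Char)), '#' ∉ p0 → (∀ q ∈ ps, '#' ∉ q) →
      pvChain tbl (p0 ++ pvFlat ps) = p0 ++ pvFlat (ps.map (pvFc tbl)) := by
  revert h
  induction tbl with
  | nil =>
    intro _ p0 ps _ _
    have : pvFc ([] : List (List Char × List Char)) = id := funext fun p => rfl
    simp [pvChain, pvFlat, this]
  | cons kv tbl' ih =>
    intro h p0 ps h0 hps
    obtain ⟨hk, hv, hknoH, hvnoH⟩ := h kv (by simp)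
    have h' : pvWf1 tbl' := fun x hx => h x (List.mem_cons_of_mem _ hx)
    have hstep : pvChain (kv :: tbl') (p0 ++ pvFlat ps) =
        pvChain tbl' (pvRS kv.1 kv.2 (p0 ++ pvFlat ps)) := by
      simp [pvChain, List.foldl_cons]
    rw [hstep, pvRS_copy kv.1 kv.2 hk _ _ h0,
      pvRS_flat kv.1 kv.2 hk hknoH hv hvnoH ps hps]
    have hpres : ∀ q ∈ ps.map (pvFApp kv.1.tail kv.2.tail), '#' ∉ q := by
      intro q hq
      obtain ⟨p, hpmem, rfl⟩ := List.mem_map.mp hq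
      unfold pvFApp
      split
      · intro hm
        rcases List.mem_append.mp hm with hm | hm
        · exact hvnoH hm
        · exact hps p hpmem (List.mem_of_mem_drop hm)
      · exact hps p hpmem
    rw [ih h' p0 _ h0 hpres]
    have hcomp : ∀ p, pvFc tbl' (pvFApp kv.1.tail kv.2.tail p) = pvFc (kv :: tbl') p :=
      fun p => rfl
    simp [List.map_map, Function.comp_def, hcomp]

theorem pvFc_id (tbl : List (List Char × List Char)) :
    ∀ (q : List Char), (∀ kv ∈ tbl, ¬ (kv.1.tail <+: q)) → pvFc tbl q = q := by
  intro q h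
  unfold pvFc
  induction tbl with
  | nil => rfl
  | cons kv tbl' ih =>
    rw [List.foldl_cons]
    have : pvFApp kv.1.tail kv.2.tail q = q := by
      unfold pvFApp
      rw [if_neg]
      intro hp
      exact h kv (by simp) (List.isPrefixOf_iff_prefix.mp hp)
    rw [this]
    exact ih (fun kv' h' => h kv' (List.mem_cons_of_mem _ h'))

theorem pv_prefix_shorten {α : Type} (a b x : List α) (h : a <+: b ++ x) (hl : a.length ≤ b.length) :
    a <+: b := by
  rw [List.prefix_iff_eq_take] at h ⊢
  rwa [List.take_append_of_le_length hl] at h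

theorem pvFc_eq_pvGc (tbl : List (List Char × List Char)) (h1 : pvWf1 tbl)
    (h2 : ∀ kv ∈ tbl, ∀ kv' ∈ tbl, kv.1.tail.length ≤ kv'.2.tail.length ∧ ¬ (kv.1.tail <+: kv'.2.tail)) :
    ∀ (p : List Char), pvFc tbl p = pvGc tbl p := by
  revert h1 h2
  induction tbl with
  | nil => intro _ _ p; rfl
  | cons kv tbl' ih =>
    intro h1 h2 p
    obtain ⟨hk, hv, hknoH, hvnoH⟩ := h1 kv (by simp)
    have hkc : kv.1 = '#' :: kv.1.tail := (List.cons_head?_tail hk).symm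
    have h1' : pvWf1 tbl' := fun x hx => h1 x (List.mem_cons_of_mem _ hx)
    have h2' : ∀ x ∈ tbl', ∀ x' ∈ tbl',
        x.1.tail.length ≤ x'.2.tail.length ∧ ¬ (x.1.tail <+: x'.2.tail) :=
      fun x hx x' hx' => h2 x (List.mem_cons_of_mem _ hx) x' (List.mem_cons_of_mem _ hx')
    by_cases hw : kv.1.tail <+: p
    · have happ : pvFApp kv.1.tail kv.2.tail p = kv.2.tail ++ List.drop kv.1.tail.length p := by
        unfold pvFApp
        rw [if_pos (List.isPrefixOf_iff_prefix.mpr hw)]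
      have hstep : pvFc (kv :: tbl') p =
          pvFc tbl' (kv.2.tail ++ List.drop kv.1.tail.length p) := by
        simp [pvFc, List.foldl_cons, happ]
      have hno : ∀ x ∈ tbl', ¬ (x.1.tail <+: kv.2.tail ++ List.drop kv.1.tail.length p) := by
        intro x hx hcon
        obtain ⟨hlen, hnp⟩ := h2 x (List.mem_cons_of_mem _ hx) kv (by simp)
        exact hnp (pv_prefix_shorten _ _ _ hcon hlen)
      rw [hstep, pvFc_id tbl' _ hno]
      have hpred : kv.1.isPrefixOf ('#' :: p) = true := by
        have hb : kv.1.tail.isPrefixOf p = true := List.isPrefixOf_iff_prefix.mpr hw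
        rw [hkc]
        simp [List.isPrefixOf, hb]
      unfold pvGc pvFindMatch
      rw [List.find?_cons]
      simp [hpred]
    · have happ : pvFApp kv.1.tail kv.2.tail p = p := by
        unfold pvFApp
        rw [if_neg (fun hc => hw (List.isPrefixOf_iff_prefix.mp hc))]
      have hstep : pvFc (kv :: tbl') p = pvFc tbl' p := by
        simp [pvFc, List.foldl_cons, happ]
      have hpred : kv.1.isPrefixOf ('#' :: p) = false := by
        apply eq_false_of_ne_true
        intro hc
        rw [hkc] at hc
        exact hw (List.cons_prefix_cons.mp (List.isPrefixOf_iff_prefix.mp hc)).2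
      have hgc : pvGc (kv :: tbl') p = pvGc tbl' p := by
        unfold pvGc pvFindMatch
        rw [List.find?_cons]
        simp [hpred]
      rw [hstep, hgc]
      exact ih h1' h2' p

theorem pv_decompose : ∀ (l : List Char), ∃ p0 ps, '#' ∉ p0 ∧ (∀ q ∈ ps, '#' ∉ q) ∧
    l = p0 ++ pvFlat ps := by
  intro l
  induction l with
  | nil => exact ⟨[], [], by simp, by simp, rfl⟩
  | cons c t ih =>
    obtain ⟨p0, ps, h0, hps, rfl⟩ := ih
    by_cases hc : c = '#'
    · subst hc
      exact ⟨[], p0 :: ps, by simp, by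
        intro q hq
        rcases List.mem_cons.mp hq with rfl | hq
        · exact h0
        · exact hps q hq, by simp [pvFlat]⟩
    · exact ⟨c :: p0, ps, by
        intro hmem
        rcases List.mem_cons.mp hmem with rfl | hmem
        · exact hc rfl
        · exact h0 hmem, hps, by simp⟩

theorem pv_list_main (l : List Char) : pvChain pvTableB l = pvSS pvTableB l := by
  obtain ⟨p0, ps, h0, hps, rfl⟩ := pv_decompose l
  rw [pvChain_flat pvTableB pvWf1_tableB p0 ps h0 hps,
    pvSS_copy pvTableB pvWf1_tableB _ _ h0,
    pvSS_flat pvTableB pvWf1_tableB ps hps]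
  have hfg : pvFc pvTableB = pvGc pvTableB :=
    funext (pvFc_eq_pvGc pvTableB pvWf1_tableB pvWf2_tableB)
  rw [hfg]

theorem pv_strrep (s old new : String) (h : old.toList ≠ []) :
    PySem.Str.replace s old new = String.ofList (pvRS old.toList new.toList s.toList) := by
  show String.ofList (PySem.Chars.replace s.toList old.toList new.toList) = _
  rw [pv_replace_eq _ _ _ h]

theorem pv_portA_eq (html : String) :
    remap_pygments_colors_to_github_like_py html = String.ofList (pvChain pvTableB html.toList) := by
  have r1 : ∀ s, PySem.Str.replace s "#008000" "#22863A" =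
      String.ofList (pvRS "#008000".toList "#22863A".toList s.toList) :=
    fun s => pv_strrep s _ _ (by decide)
  have r2 : ∀ s, PySem.Str.replace s "#00F" "#6F42C1" =
      String.ofList (pvRS "#00F".toList "#6F42C1".toList s.toList) :=
    fun s => pv_strrep s _ _ (by decide)
  have r3 : ∀ s, PySem.Str.replace s "#0000FF" "#6F42C1" =
      String.ofList (pvRS "#0000FF".toList "#6F42C1".toList s.toList) :=
    fun s => pv_strrep s _ _ (by decide)
  have r4 : ∀ s, PySem.Str.replace s "#19177C" "#005CC5" =
      String.ofList (pvRS "#19177C".toList "#005CC5".toList s.toList) :=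
    fun s => pv_strrep s _ _ (by decide)
  have r5 : ∀ s, PySem.Str.replace s "#666" "#24292E" =
      String.ofList (pvRS "#666".toList "#24292E".toList s.toList) :=
    fun s => pv_strrep s _ _ (by decide)
  have r6 : ∀ s, PySem.Str.replace s "#666666" "#24292E" =
      String.ofList (pvRS "#666666".toList "#24292E".toList s.toList) :=
    fun s => pv_strrep s _ _ (by decide)
  have r7 : ∀ s, PySem.Str.replace s "#BA2121" "#032F62" =
      String.ofList (pvRS "#BA2121".toList "#032F62".toList s.toList) :=
    fun s => pv_strrep s _ _ (by decide)
  have r8 : ∀ s, PySem.Str.replace s "#AA5D1F" "#032F62" =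
      String.ofList (pvRS "#AA5D1F".toList "#032F62".toList s.toList) :=
    fun s => pv_strrep s _ _ (by decide)
  have r9 : ∀ s, PySem.Str.replace s "#3D7B7B" "#6A737D" =
      String.ofList (pvRS "#3D7B7B".toList "#6A737D".toList s.toList) :=
    fun s => pv_strrep s _ _ (by decide)
  have r10 : ∀ s, PySem.Str.replace s "#BBB" "#24292E" =
      String.ofList (pvRS "#BBB".toList "#24292E".toList s.toList) :=
    fun s => pv_strrep s _ _ (by decide)
  have r11 : ∀ s, PySem.Str.replace s "#bbbbbb" "#24292E" =
      String.ofList (pvRS "#bbbbbb".toList "#24292E".toList s.toList) :=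
    fun s => pv_strrep s _ _ (by decide)
  simp only [remap_pygments_colors_to_github_like_py,
    r1, r2, r3, r4, r5, r6, r7, r8, r9, r10, r11, String.toList_ofList,
    pvChain, pvTableB, pvColorMap, List.map_cons, List.map_nil,
    List.foldl_cons, List.foldl_nil]

-- ===== VERDICT (by name: the statement is the Claim_ definition above) =====
theorem remap_pygments_colors_to_github_like_py_spec : Claim_equal_remap_pygments_colors_to_github_like_py := by
  intro html _
  unfold Spec_remap_pygments_colors_to_github_like_py
  rw [pv_portA_eq, pv_list_main]
  rfl
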